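-- pv_equiv track=rewrite | github.com/seanchatmangpt/AutoGPT | autogpts/test_agent/forge/sdk/benchmarks/matrix_overnight/code_duplication_detection_function_2023-10-24_11-47-53.py | detect_code_duplication
-- ===== SOURCE A (Python) =====
-- def detect_code_duplication(code):
--     """
--     Function to detect and highlight instances of code duplication in a given code.
--
--     Parameters:
--         code (str): The code to be analyzed.
--
--     Returns:
--         highlighted_code (str): The code with instances of duplication highlighted.
--
--     """
--     # Split the code into lines
--     lines = code.splitlines()
--     # Initialize a dictionary to store the duplicated code and its line numbers
--     duplicates = {}
--     # Loop through the lines of code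
--     for i, line in enumerate(lines):
--         # Check if the line is already in the duplicates dictionary
--         if line in duplicates:
--             # Add the line number of the duplicated code to the dictionary
--             duplicates[line].append(i + 1)
--         else:
--             # Add the line number of the code to the dictionary
--             duplicates[line] = [i + 1]
--     # Loop through the duplicates dictionary
--     for dup in duplicates:
--         # Check if there are more than one line numbers for the duplicated code
--         if len(duplicates[dup]) > 1:
--             # Loop through the line numbers and highlight them in the code
--             for line_num in duplicates[dup]:
--                 lines[line_num - 1] = f"**{lines[line_num - 1]}**"
--     # Join the lines of code back together
--     highlighted_code = "\n".join(lines)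
--     # Return the highlighted code
--     return highlighted_code
-- ===== SOURCE B (Python) =====
-- def detect_code_duplication(code):
--     lines = code.splitlines()
--     counts = {}
--     for line in lines:
--         counts[line] = counts.get(line, 0) + 1
--     return "\n".join(f"**{line}**" if counts[line] > 1 else line for line in lines)
-- ===== Notes on version B (the rewrite author's own statement) =====
-- stated objective: simpler
-- what changed: Replaces the dict of per-line line-number lists and the dict-iteration that writes back into the lines array by index with a one-pass frequency count followed by a single forward pass over the lines that wraps a line when its count exceeds 1.
import Mathlib
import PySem

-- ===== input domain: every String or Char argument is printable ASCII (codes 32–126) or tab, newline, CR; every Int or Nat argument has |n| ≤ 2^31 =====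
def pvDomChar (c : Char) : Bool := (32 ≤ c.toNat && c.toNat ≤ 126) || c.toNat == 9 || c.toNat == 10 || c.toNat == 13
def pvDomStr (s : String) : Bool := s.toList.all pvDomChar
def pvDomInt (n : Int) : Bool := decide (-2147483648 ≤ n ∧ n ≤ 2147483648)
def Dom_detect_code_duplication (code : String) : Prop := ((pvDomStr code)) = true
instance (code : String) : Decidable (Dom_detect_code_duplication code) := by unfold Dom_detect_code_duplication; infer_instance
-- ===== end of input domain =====

-- B replaces A's dict of per-line line-number lists (+ dict-iteration writing back into the
-- lines array by index) with a one-pass frequency count and a single forward pass over the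
-- lines; objective: simpler.


-- ===== PORT A =====
def detect_code_duplication (code : String) : String :=
  -- lines = code.splitlines()
  let lines := PySem.Str.splitlines code
  -- duplicates = {}; for i, line in enumerate(lines): append i+1 / start [i+1]
  let duplicates : PySem.Dict String (List Int) :=
    (PySem.List.enumerate lines 0).foldl
      (fun d p =>
        if d.contains p.2 then d.modify p.2 [] (fun v => v ++ [p.1 + 1])
        else d.insert p.2 [p.1 + 1])
      PySem.Dict.empty
  -- for dup in duplicates: if len(duplicates[dup]) > 1: for line_num: lines[line_num-1] = f"**{...}**"
  let lines2 :=
    duplicates.keys.foldl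
      (fun ls dup =>
        if 1 < (duplicates.getD dup []).length then
          (duplicates.getD dup []).foldl
            (fun ls n =>
              PySem.List.pySetD ls (n - 1) ("**" ++ PySem.List.pyGetD ls (n - 1) "" ++ "**"))
            ls
        else ls)
      lines
  -- "\n".join(lines)
  PySem.Str.join "\n" lines2

-- ===== PORT B =====
def detect_code_duplication_alt (code : String) : String :=
  let lines := PySem.Str.splitlines code
  -- counts = {}; for line in lines: counts[line] = counts.get(line, 0) + 1
  let counts : PySem.Dict String Int :=
    lines.foldl (fun d line => d.insert line (d.getD line 0 + 1)) PySem.Dict.empty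
  -- "\n".join(f"**{line}**" if counts[line] > 1 else line for line in lines)
  PySem.Str.join "\n"
    (lines.map (fun line => if 1 < counts.getD line 0 then "**" ++ line ++ "**" else line))

-- ===== PRECONDITION & SPEC =====
def Spec_detect_code_duplication (code : String) (out : String) : Prop := out = detect_code_duplication_alt code
instance (code : String) (out : String) : Decidable (Spec_detect_code_duplication code out) := by unfold Spec_detect_code_duplication; infer_instance

-- ===== CLAIM (what is proved, stated in full; the proofs are below) =====
def Claim_equal_detect_code_duplication : Prop := ∀ (code : String), Dom_detect_code_duplication code → Spec_detect_code_duplication code (detect_code_duplication code)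

-- ===== LEMMAS AND PROOFS =====

-- 1-based positions at which line k occurs (what A's dict stores under key k)
def pvOcc (lines : List String) (k : String) : List Int :=
  ((PySem.List.enumerate lines 0).filter (fun p => p.2 == k)).map (fun p => p.1 + 1)

lemma mem_occAux (xs : List String) (k : String) (s n : Int) :
    n ∈ ((PySem.List.enumerate xs s).filter (fun p => p.2 == k)).map (fun p => p.1 + 1) ↔
    ∃ j : Nat, j < xs.length ∧ n = s + j + 1 ∧ xs[j]? = some k := by
  induction xs generalizing s with
  | nil => simp [PySem.List.enumerate_nil]
  | cons x xs ih =>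
    simp only [PySem.List.enumerate_cons, List.filter_cons]
    by_cases hx : x = k
    · simp only [hx, beq_self_eq_true, if_pos, List.map_cons, List.mem_cons, ih]
      constructor
      · rintro (h | ⟨j, hj, rfl, hjk⟩)
        · exact ⟨0, by simp, by omega, by simp⟩
        · exact ⟨j + 1, by simpa using hj, by push_cast; omega, by simpa using hjk⟩
      · rintro ⟨j, hj, rfl, hjk⟩
        cases j with
        | zero => left; omega
        | succ j => right; exact ⟨j, by simpa using hj, by push_cast; omega, by simpa using hjk⟩
    · rw [if_neg (by simpa using hx)]
      rw [ih]
      constructor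
      · rintro ⟨j, hj, rfl, hjk⟩
        exact ⟨j + 1, by simpa using hj, by push_cast; omega, by simpa using hjk⟩
      · rintro ⟨j, hj, rfl, hjk⟩
        cases j with
        | zero => exact absurd (by simpa using hjk) hx
        | succ j => exact ⟨j, by simpa using hj, by push_cast; omega, by simpa using hjk⟩

lemma mem_pvOcc (lines : List String) (k : String) (n : Int) :
    n ∈ pvOcc lines k ↔ ∃ j : Nat, j < lines.length ∧ n = (j : Int) + 1 ∧ lines[j]? = some k := by
  rw [pvOcc, mem_occAux]; simp

lemma length_occAux (xs : List String) (k : String) (s : Int) :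
    (((PySem.List.enumerate xs s).filter (fun p => p.2 == k)).map (fun p => p.1 + 1)).length
      = xs.count k := by
  induction xs generalizing s with
  | nil => simp [PySem.List.enumerate_nil]
  | cons x xs ih =>
    simp only [PySem.List.enumerate_cons, List.filter_cons, List.count_cons]
    by_cases hx : x = k
    · simp [hx, ih]
    · simp [(by simpa using hx : ¬ (x == k) = true), ih]

lemma length_pvOcc (lines : List String) (k : String) :
    (pvOcc lines k).length = lines.count k := length_occAux lines k 0

lemma nodup_pvOcc (lines : List String) (k : String) : (pvOcc lines k).Nodup := by
  have h1 : (((PySem.List.enumerate lines 0).filter (fun p => p.2 == k)).map (fun p : Int × String => p.1)).Nodup := by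
    have hsub : (((PySem.List.enumerate lines 0).filter (fun p => p.2 == k)).map (fun p : Int × String => p.1)).Sublist ((PySem.List.enumerate lines 0).map (fun p : Int × String => p.1)) :=
      List.Sublist.map _ List.filter_sublist
    have h2 : ((PySem.List.enumerate lines 0).map (fun p : Int × String => p.1)).Nodup := by
      rw [PySem.List.map_fst_enumerate]
      exact PySem.List.nodup_pyRange_one _ _
    exact h2.sublist hsub
  have : pvOcc lines k = (((PySem.List.enumerate lines 0).filter (fun p => p.2 == k)).map (fun p : Int × String => p.1)).map (fun n => n + 1) := by
    rw [pvOcc, List.map_map]; rfl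
  rw [this]
  exact h1.map (fun a b hab => by omega)

lemma stepA_eq (d : PySem.Dict String (List Int)) (p : Int × String) :
    (if d.contains p.2 then d.modify p.2 [] (fun v => v ++ [p.1 + 1])
     else d.insert p.2 [p.1 + 1])
    = d.modify p.2 [] (fun v => v ++ [p.1 + 1]) := by
  by_cases h : d.contains p.2 = true
  · rw [if_pos h]
  · rw [if_neg h, PySem.Dict.modify,
      PySem.Dict.getD_of_not_contains _ _ (Bool.not_eq_true _ ▸ h)]
    rfl

lemma dictA_eq (lines : List String) :
    ((PySem.List.enumerate lines 0).foldl
      (fun d p =>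
        if d.contains p.2 then d.modify p.2 [] (fun v => v ++ [p.1 + 1])
        else d.insert p.2 [p.1 + 1])
      (PySem.Dict.empty : PySem.Dict String (List Int)))
    = (PySem.List.enumerate lines 0).foldl
        (fun d p => d.modify p.2 [] (fun v => v ++ [p.1 + 1])) PySem.Dict.empty :=
  PySem.List.foldl_congr_mem _ _ _ _ (fun d p _ => stepA_eq d p)

lemma dictA_getD (lines : List String) (k : String) :
    ((PySem.List.enumerate lines 0).foldl
      (fun d p =>
        if d.contains p.2 then d.modify p.2 [] (fun v => v ++ [p.1 + 1])
        else d.insert p.2 [p.1 + 1])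
      (PySem.Dict.empty : PySem.Dict String (List Int))).getD k [] = pvOcc lines k := by
  rw [dictA_eq]
  have := PySem.Dict.getD_foldl_modify_append
    ((PySem.List.enumerate lines 0).map (fun p => (p.2, p.1 + 1)))
    (PySem.Dict.empty : PySem.Dict String (List Int)) k
  rw [List.foldl_map] at this
  rw [this, PySem.Dict.getD_empty, List.nil_append, pvOcc, List.filter_map, List.map_map]
  rfl

lemma dictA_keys (lines : List String) :
    ((PySem.List.enumerate lines 0).foldl
      (fun d p =>
        if d.contains p.2 then d.modify p.2 [] (fun v => v ++ [p.1 + 1])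
        else d.insert p.2 [p.1 + 1])
      (PySem.Dict.empty : PySem.Dict String (List Int))).keys
      = PySem.Set.update [] lines := by
  rw [dictA_eq]
  rw [PySem.Dict.keys_foldl_modify_key (PySem.List.enumerate lines 0)
    (fun p : Int × String => p.2) [] (fun d p => fun v => v ++ [p.1 + 1]) PySem.Dict.empty]
  rw [PySem.List.map_snd_enumerate, PySem.Dict.keys_empty]

lemma dictA_keys_nodup (lines : List String) :
    ((PySem.List.enumerate lines 0).foldl
      (fun d p =>
        if d.contains p.2 then d.modify p.2 [] (fun v => v ++ [p.1 + 1])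
        else d.insert p.2 [p.1 + 1])
      (PySem.Dict.empty : PySem.Dict String (List Int))).keys.Nodup := by
  rw [dictA_eq]
  exact PySem.Dict.nodup_keys_foldl_modify_key _ (fun p : Int × String => p.2) []
    (fun d p => fun v => v ++ [p.1 + 1]) _ PySem.Dict.nodup_keys_empty

lemma inner_fold (k : String) (ns : List Int) (ls : List String)
    (hnd : ns.Nodup)
    (h : ∀ n ∈ ns, 1 ≤ n ∧ n ≤ (ls.length : Int) ∧ ls[(n - 1).toNat]? = some k) :
    ∀ j : Nat,
      (ns.foldl
        (fun ls n =>
          PySem.List.pySetD ls (n - 1) ("**" ++ PySem.List.pyGetD ls (n - 1) "" ++ "**")) ls)[j]?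
      = if ((j : Int) + 1) ∈ ns then some ("**" ++ k ++ "**") else ls[j]? := by
  induction ns generalizing ls with
  | nil => intro j; simp
  | cons n ns ih =>
    intro j
    obtain ⟨h1, h2, h3⟩ := h n (List.mem_cons_self)
    have hlt : n - 1 < (ls.length : Int) := by omega
    have h0 : (0 : Int) ≤ n - 1 := by omega
    have hget : PySem.List.pyGetD ls (n - 1) "" = k := by
      rw [PySem.List.pyGetD_eq_getElem ls "" h0 hlt]
      have := List.getElem?_eq_getElem (l := ls) (i := (n-1).toNat) (by omega)
      rw [this] at h3
      exact Option.some.inj h3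
    rw [List.foldl_cons, hget, PySem.List.pySetD_of_nonneg ls _ h0]
    set ls' := ls.set (n - 1).toNat ("**" ++ k ++ "**") with hls'
    have hlen' : ls'.length = ls.length := by simp [hls']
    have hstep : ∀ m ∈ ns, 1 ≤ m ∧ m ≤ (ls'.length : Int) ∧ ls'[(m - 1).toNat]? = some k := by
      intro m hm
      obtain ⟨m1, m2, m3⟩ := h m (List.mem_cons_of_mem _ hm)
      refine ⟨m1, by omega, ?_⟩
      have hne : (n - 1).toNat ≠ (m - 1).toNat := by
        intro hcon
        exact ((List.nodup_cons.mp hnd).1) (by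
          have : n = m := by omega
          exact this ▸ hm)
      rw [hls', List.getElem?_set_ne hne]
      exact m3
    rw [ih ls' (List.nodup_cons.mp hnd).2 hstep j]
    by_cases hj : ((j : Int) + 1) ∈ ns
    · rw [if_pos hj, if_pos (List.mem_cons_of_mem _ hj)]
    · rw [if_neg hj]
      by_cases hjn : (j : Int) + 1 = n
      · rw [if_pos (by rw [hjn]; exact List.mem_cons_self)]
        have hjeq : (n - 1).toNat = j := by omega
        rw [hls', hjeq, List.getElem?_set_self (by omega)]
      · rw [if_neg (by
          intro hc
          rcases List.mem_cons.mp hc with hc | hc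
          · exact hjn hc
          · exact hj hc)]
        rw [hls', List.getElem?_set_ne (by omega)]

lemma outer_fold (lines : List String) (K : List String) (p : String → Bool)
    (hnd : K.Nodup) (hp : ∀ k ∈ K, p k = false) :
    K.foldl
      (fun ls dup =>
        if 1 < (pvOcc lines dup).length then
          (pvOcc lines dup).foldl
            (fun ls n =>
              PySem.List.pySetD ls (n - 1) ("**" ++ PySem.List.pyGetD ls (n - 1) "" ++ "**"))
            ls
        else ls)
      (lines.map (fun l => if p l then "**" ++ l ++ "**" else l))
    = lines.map (fun l =>
        if p l || (decide (l ∈ K) && decide (1 < lines.count l)) then "**" ++ l ++ "**" else l) := by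
  induction K generalizing p with
  | nil => simp
  | cons k K ih =>
    have hk : p k = false := hp k List.mem_cons_self
    have hndK : K.Nodup := (List.nodup_cons.mp hnd).2
    have hkK : k ∉ K := (List.nodup_cons.mp hnd).1
    rw [List.foldl_cons]
    by_cases hc : 1 < (pvOcc lines k).length
    · rw [if_pos hc]
      have hinner : (pvOcc lines k).foldl
          (fun ls n =>
            PySem.List.pySetD ls (n - 1) ("**" ++ PySem.List.pyGetD ls (n - 1) "" ++ "**"))
          (lines.map (fun l => if p l then "**" ++ l ++ "**" else l))
          = lines.map (fun l => if (p l || (l == k)) then "**" ++ l ++ "**" else l) := by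
        set ls := lines.map (fun l => if p l then "**" ++ l ++ "**" else l) with hls
        have hlen : ls.length = lines.length := by simp [hls]
        have hhyp : ∀ n ∈ pvOcc lines k,
            1 ≤ n ∧ n ≤ (ls.length : Int) ∧ ls[(n - 1).toNat]? = some k := by
          intro n hn
          obtain ⟨j, hj, rfl, hjk⟩ := (mem_pvOcc lines k n).mp hn
          have hjv : lines[j]? = some k := hjk
          have hjl : lines[j] = k := by
            have := List.getElem?_eq_getElem (l := lines) (i := j) hj
            rw [this] at hjv; exact Option.some.inj hjv
          refine ⟨by omega, by omega, ?_⟩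
          have : ((j : Int) + 1 - 1).toNat = j := by omega
          rw [this, hls, List.getElem?_map,
            List.getElem?_eq_getElem (l := lines) (i := j) hj]
          simp [hjl, hk]
        apply List.ext_getElem?
        intro j
        rw [inner_fold k (pvOcc lines k) ls (nodup_pvOcc lines k) hhyp j]
        by_cases hj : j < lines.length
        · have hmem : ((j : Int) + 1) ∈ pvOcc lines k ↔ lines[j] = k := by
            rw [mem_pvOcc]
            constructor
            · rintro ⟨j', hj', hjj, hjk⟩
              have hj'e : j' = j := by omega
              rw [hj'e] at hjk
              rw [List.getElem?_eq_getElem (l := lines) (i := j) hj] at hjk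
              exact Option.some.inj hjk
            · intro hlj
              exact ⟨j, hj, rfl, by rw [List.getElem?_eq_getElem (l := lines) (i := j) hj, hlj]⟩
          by_cases hlj : lines[j] = k
          · rw [if_pos (hmem.mpr hlj), List.getElem?_map,
              List.getElem?_eq_getElem (l := lines) (i := j) hj]
            simp [hlj]
          · rw [if_neg (fun hc' => hlj (hmem.mp hc')), hls]
            rw [List.getElem?_map, List.getElem?_map,
              List.getElem?_eq_getElem (l := lines) (i := j) hj]
            simp [hlj]
        · have h1 : ((j : Int) + 1) ∉ pvOcc lines k := by
            rw [mem_pvOcc]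
            rintro ⟨j', hj', hjj, _⟩
            omega
          rw [if_neg h1, hls, List.getElem?_map, List.getElem?_map,
            List.getElem?_eq_none (l := lines) (by omega)]
          rfl
      rw [hinner]
      rw [ih (fun l => p l || (l == k)) hndK
        (fun k' hk' => by
          have h2 : k' ≠ k := fun hcon => hkK (hcon ▸ hk')
          simp [hp k' (List.mem_cons_of_mem _ hk'), h2])]
      congr 1
      funext l
      by_cases hl : l = k
      · subst hl
        have hcnt : 1 < lines.count l := by rw [← length_pvOcc]; exact hc
        simp [hcnt]
      · have : (l == k) = false := by simp [hl]
        simp [this, hl]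
    · rw [if_neg hc]
      rw [ih p hndK (fun k' hk' => hp k' (List.mem_cons_of_mem _ hk'))]
      congr 1
      funext l
      by_cases hl : l = k
      · subst hl
        have hcnt : ¬ (1 < lines.count l) := by rw [← length_pvOcc]; exact hc
        simp [hcnt, hkK]
      · simp [hl]

-- ===== VERDICT (by name: the statement is the Claim_ definition above) =====
theorem detect_code_duplication_spec : Claim_equal_detect_code_duplication := by
  intro code _
  show detect_code_duplication code = detect_code_duplication_alt code
  unfold detect_code_duplication detect_code_duplication_alt
  simp only []
  set lines := PySem.Str.splitlines code with hlines
  set d : PySem.Dict String (List Int) :=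
    (PySem.List.enumerate lines 0).foldl
      (fun d p =>
        if d.contains p.2 then d.modify p.2 [] (fun v => v ++ [p.1 + 1])
        else d.insert p.2 [p.1 + 1])
      PySem.Dict.empty with hd
  congr 1
  have hfun : d.keys.foldl
      (fun ls dup =>
        if 1 < (d.getD dup []).length then
          (d.getD dup []).foldl
            (fun ls n =>
              PySem.List.pySetD ls (n - 1) ("**" ++ PySem.List.pyGetD ls (n - 1) "" ++ "**"))
            ls
        else ls) lines
      = d.keys.foldl
      (fun ls dup =>
        if 1 < (pvOcc lines dup).length then
          (pvOcc lines dup).foldl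
            (fun ls n =>
              PySem.List.pySetD ls (n - 1) ("**" ++ PySem.List.pyGetD ls (n - 1) "" ++ "**"))
            ls
        else ls) lines := by
    apply PySem.List.foldl_congr_mem
    intro ls dup _
    rw [hd, dictA_getD]
  rw [hfun]
  have hinit : lines = lines.map (fun l => if (fun _ : String => false) l then "**" ++ l ++ "**" else l) := by
    simp
  have houter := outer_fold lines d.keys (fun _ => false) (hd ▸ dictA_keys_nodup lines) (fun _ _ => rfl)
  rw [← hinit] at houter
  rw [houter]
  simp only [PySem.Dict.foldl_insert_getD_add_one_eq_counter, PySem.Dict.getD_counter]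
  apply List.map_congr_left
  intro l hl
  have hmem : l ∈ d.keys := by
    rw [hd, dictA_keys]
    exact (PySem.Set.mem_update _ _ _).mpr (Or.inr hl)
  by_cases hc : 1 < lines.count l
  · have hc' : (1 : Int) < (lines.count l : Int) := by exact_mod_cast hc
    simp [hmem, hc, hc']
  · have hc' : ¬ (1 : Int) < (lines.count l : Int) := by exact_mod_cast hc
    simp [hc, hc']
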